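-- pv_equiv track=rewrite | github.com/Pratikn03/Capstone_Projects | src/orius/universal_theory/observation_ambiguity.py | common_safe_core
-- ===== SOURCE A (Python) =====
-- from collections.abc import Hashable, Iterable, Mapping
--
-- State = Hashable
--
-- Action = Hashable
--
-- def _state_set(states: Iterable[State], *, name: str) -> tuple[State, ...]:
--     values = tuple(states)
--     if not values:
--         raise ValueError(f"{name} must contain at least one state.")
--     return values
--
-- def _action_set(actions: Iterable[Action], *, name: str) -> frozenset[Action]:
--     values = frozenset(actions)
--     if not values:
--         raise ValueError(f"{name} must contain at least one action.")
--     return values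
--
-- def _safe_actions_for(state: State, safe_action_sets: Mapping[State, Iterable[Action]]) -> frozenset[Action]:
--     if state not in safe_action_sets:
--         raise KeyError(f"Missing safe-action set for state {state!r}.")
--     return _action_set(safe_action_sets[state], name=f"safe_action_sets[{state!r}]")
--
-- def common_safe_core(
--     ambiguity_class: Iterable[State],
--     safe_action_sets: Mapping[State, Iterable[Action]],
-- ) -> frozenset[Action]:
--     """Return the actions safe for every state in an ambiguity class.
--
--     This is the corrected impossibility object.  If two states have different
--     safe sets but their intersection is non-empty, an observation-only policy
--     can still choose a common safe action for that class.
--     """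
--     states = _state_set(ambiguity_class, name="ambiguity_class")
--     core = set(_safe_actions_for(states[0], safe_action_sets))
--     for state in states[1:]:
--         core.intersection_update(_safe_actions_for(state, safe_action_sets))
--     return frozenset(core)
-- ===== SOURCE B (Python) =====
-- def common_safe_core(ambiguity_class, safe_action_sets):
--     """Tally, in one pass, how many states each action is safe for; the core is
--     the set of actions counted once per state occurrence."""
--     states = tuple(ambiguity_class)
--     if not states:
--         raise ValueError("ambiguity_class must contain at least one state.")
--     counts = {}
--     for state in states:
--         if state not in safe_action_sets:
--             raise KeyError(f"Missing safe-action set for state {state!r}.")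
--         actions = frozenset(safe_action_sets[state])
--         if not actions:
--             raise ValueError(f"safe_action_sets[{state!r}] must contain at least one action.")
--         for action in actions:
--             counts[action] = counts.get(action, 0) + 1
--     return frozenset(action for action, n in counts.items() if n == len(states))
-- ===== Notes on version B (the rewrite author's own statement) =====
-- stated objective: alternative
-- what changed: Replaces the iterative set-intersection (seed with the first state's set, intersection_update per remaining state) with a single counting pass over all states into a dict, keeping actions whose tally equals the number of state occurrences.
import Mathlib
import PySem

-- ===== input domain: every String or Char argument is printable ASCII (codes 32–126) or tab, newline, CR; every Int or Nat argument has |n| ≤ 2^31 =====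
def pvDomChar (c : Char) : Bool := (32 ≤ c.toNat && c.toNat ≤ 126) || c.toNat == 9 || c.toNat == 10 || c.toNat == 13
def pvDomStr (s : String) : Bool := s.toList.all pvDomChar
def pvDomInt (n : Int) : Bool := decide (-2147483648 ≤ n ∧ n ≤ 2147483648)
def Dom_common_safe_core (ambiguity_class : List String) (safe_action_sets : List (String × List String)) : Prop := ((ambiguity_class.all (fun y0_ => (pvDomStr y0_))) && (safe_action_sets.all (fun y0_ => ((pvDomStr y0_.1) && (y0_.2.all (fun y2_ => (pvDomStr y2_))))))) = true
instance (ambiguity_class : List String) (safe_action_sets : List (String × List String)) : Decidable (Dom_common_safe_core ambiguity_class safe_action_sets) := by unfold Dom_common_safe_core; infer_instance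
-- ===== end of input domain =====

-- B replaces the iterative set intersection by a one-pass occurrence counter; alternative decomposition, same cost.
-- The frozenset return is modelled as a PySem.Set's list; the ports agree on it exactly.

-- ===== PORT A =====
-- _safe_actions_for + _action_set: frozenset(safe_action_sets[state]); missing key / empty set raise (excluded by Pre_)
def safeActionsFor (safe_action_sets : List (String × List String)) (state : String) : PySem.Set String :=
  PySem.Set.ofList ((PySem.Dict.mk safe_action_sets).getD state [])

def common_safe_core (ambiguity_class : List String) (safe_action_sets : List (String × List String)) : List String :=
  match ambiguity_class with
  | [] => []   -- _state_set raises ValueError (outside Pre_)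
  | s0 :: rest =>
    -- core = set(first); for state in states[1:]: core &= safe(state)
    rest.foldl (fun core s => PySem.Set.inter core (safeActionsFor safe_action_sets s))
      (safeActionsFor safe_action_sets s0)

-- ===== PORT B =====
def common_safe_core_alt (ambiguity_class : List String) (safe_action_sets : List (String × List String)) : List String :=
  match ambiguity_class with
  | [] => []   -- raise ValueError (outside Pre_)
  | s0 :: rest =>
    let states := s0 :: rest
    -- counts[action] = counts.get(action, 0) + 1 over each state's action set
    let counts : PySem.Dict String Int :=
      states.foldl
        (fun d s => (safeActionsFor safe_action_sets s).foldl (fun d a => d.modify a 0 (· + 1)) d)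
        PySem.Dict.empty
    (counts.items.filter (fun p => p.2 == (states.length : Int))).map (·.1)

-- ===== PRECONDITION & SPEC =====
-- Pre_ excludes exactly the inputs where A raises: empty ambiguity_class (ValueError), a state
-- missing from safe_action_sets (KeyError) or mapped to an empty action set (ValueError).
def Pre_common_safe_core (ambiguity_class : List String) (safe_action_sets : List (String × List String)) : Prop :=
  ambiguity_class ≠ [] ∧ ∀ s ∈ ambiguity_class, (PySem.Dict.mk safe_action_sets).getD s [] ≠ []

instance (ambiguity_class : List String) (safe_action_sets : List (String × List String)) : Decidable (Pre_common_safe_core ambiguity_class safe_action_sets) := by unfold Pre_common_safe_core; infer_instance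

def pvWitness_common_safe_core : List String × (List (String × List String)) :=
  (["s1", "s2"], [("s1", ["a", "b"]), ("s2", ["b", "c"])])

def Spec_common_safe_core (ambiguity_class : List String) (safe_action_sets : List (String × List String)) (out : List String) : Prop := out = common_safe_core_alt ambiguity_class safe_action_sets
instance (ambiguity_class : List String) (safe_action_sets : List (String × List String)) (out : List String) : Decidable (Spec_common_safe_core ambiguity_class safe_action_sets out) := by unfold Spec_common_safe_core; infer_instance

-- ===== CLAIM (what is proved, stated in full; the proofs are below) =====
def Claim_equal_common_safe_core : Prop := ∀ (ambiguity_class : List String) (safe_action_sets : List (String × List String)), Dom_common_safe_core ambiguity_class safe_action_sets → Pre_common_safe_core ambiguity_class safe_action_sets → Spec_common_safe_core ambiguity_class safe_action_sets (common_safe_core ambiguity_class safe_action_sets)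

-- ===== LEMMAS AND PROOFS =====

theorem set_inter_eq_filter (s t : PySem.Set String) :
    PySem.Set.inter s t = s.filter (fun a => PySem.Set.contains t a) := by
  simp [PySem.Set.inter]

-- A's loop: repeated intersection = one filter by membership in every remaining set
theorem foldl_inter_eq_filter (rest : List String) (f : String → PySem.Set String)
    (init : PySem.Set String) :
    rest.foldl (fun core s => PySem.Set.inter core (f s)) init
      = init.filter (fun a => rest.all (fun s => PySem.Set.contains (f s) a)) := by
  induction rest generalizing init with
  | nil => simp
  | cons s rest ih =>
    rw [List.foldl_cons, set_inter_eq_filter, ih, List.filter_filter]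
    apply List.filter_congr
    intro a _
    simp [Bool.and_comm]

-- B's nested loop counts over the concatenation of all the sets
theorem foldl_foldl_eq_flatMap (states : List String) (f : String → List String)
    (d : PySem.Dict String Int) :
    states.foldl (fun d s => (f s).foldl (fun d a => d.modify a 0 (· + 1)) d) d
      = (states.flatMap f).foldl (fun d a => d.modify a 0 (· + 1)) d := by
  induction states generalizing d with
  | nil => rfl
  | cons s rest ih => simp [List.flatMap_cons, List.foldl_append, ih]

theorem count_flatMap_eq_countP (states : List String) (f : String → PySem.Set String)
    (hnd : ∀ s, (f s).Nodup) (a : String) :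
    (states.flatMap f).count a = states.countP (fun s => PySem.Set.contains (f s) a) := by
  induction states with
  | nil => rfl
  | cons s rest ih =>
    simp only [List.flatMap_cons, List.count_append, List.countP_cons, ih]
    by_cases h : a ∈ f s
    · rw [List.count_eq_one_of_mem (hnd s) h, (PySem.Set.contains_iff (f s) a).mpr h]
      simp [Nat.add_comm]
    · have hc : PySem.Set.contains (f s) a = false := by
        rw [Bool.eq_false_iff]
        intro hb
        exact h ((PySem.Set.contains_iff (f s) a).mp hb)
      rw [List.count_eq_zero_of_not_mem h, hc]
      simp

-- appended new elements never satisfy a predicate implying membership in s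
theorem filter_update_eq (s : PySem.Set String) (xs : List String) (p : String → Bool)
    (h : ∀ a, p a = true → a ∈ s) :
    (PySem.Set.update s xs).filter p = s.filter p := by
  rw [PySem.Set.update_eq_append_filter, List.filter_append]
  have hnil : ((PySem.Set.ofList xs).filter (fun y => !(PySem.Set.contains s y))).filter p = [] := by
    rw [List.filter_eq_nil_iff]
    intro a ha hp
    simp [List.mem_filter] at ha
    exact ha.2 (h a hp)
  rw [hnil, List.append_nil]

-- B's result characterised: filter of the ordered union by "count = number of states"
theorem alt_eq_filter (s0 : String) (rest : List String)
    (sas : List (String × List String)) :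
    common_safe_core_alt (s0 :: rest) sas
      = (PySem.Set.ofList ((s0 :: rest).flatMap (fun s => safeActionsFor sas s))).filter
          (fun a => (((s0 :: rest).flatMap (fun s => safeActionsFor sas s)).count a : Int)
                      == ((s0 :: rest).length : Int)) := by
  simp only [common_safe_core_alt, foldl_foldl_eq_flatMap]
  rw [show ((s0 :: rest).flatMap fun s => safeActionsFor sas s).foldl
        (fun d a => d.modify a 0 (· + 1)) PySem.Dict.empty
      = PySem.Dict.counter ((s0 :: rest).flatMap fun s => safeActionsFor sas s) from rfl]
  rw [PySem.Dict.items_counter, List.filter_map, List.map_map]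
  simp [Function.comp_def]

-- ===== VERDICT (by name: the statement is the Claim_ definition above) =====
theorem common_safe_core_spec : Claim_equal_common_safe_core := by
  intro ac sas _ _
  unfold Spec_common_safe_core
  cases ac with
  | nil => rfl
  | cons s0 rest =>
    have hnd : ∀ s, (safeActionsFor sas s).Nodup := fun s => PySem.Set.nodup_ofList _
    have hcnt : ∀ a, ((s0 :: rest).flatMap (fun s => safeActionsFor sas s)).count a
        = (s0 :: rest).countP (fun s => PySem.Set.contains (safeActionsFor sas s) a) :=
      count_flatMap_eq_countP (s0 :: rest) _ hnd
    rw [alt_eq_filter]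
    show rest.foldl (fun core s => PySem.Set.inter core (safeActionsFor sas s))
        (safeActionsFor sas s0) = _
    rw [foldl_inter_eq_filter]
    rw [List.flatMap_cons, PySem.Set.ofList_append,
        PySem.Set.ofList_eq_self_of_nodup _ (hnd s0)]
    -- the predicate "count = number of states" forces membership in the first set
    have hmem : ∀ a,
        (((((safeActionsFor sas s0 : List String)
              ++ rest.flatMap (fun s => safeActionsFor sas s)).count a : Int))
           == ((s0 :: rest).length : Int)) = true
        → a ∈ safeActionsFor sas s0 := by
      intro a hp
      have h1 : ((safeActionsFor sas s0 : List String)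
          ++ rest.flatMap (fun s => safeActionsFor sas s)).count a = (s0 :: rest).length := by
        exact_mod_cast (beq_iff_eq.mp hp)
      rw [← List.flatMap_cons, hcnt a] at h1
      have hall := List.countP_eq_length.mp h1
      exact (PySem.Set.contains_iff (safeActionsFor sas s0) a).mp (hall s0 List.mem_cons_self)
    rw [List.flatMap_cons] at hcnt
    rw [filter_update_eq _ _ _ hmem]
    apply List.filter_congr
    intro a ha
    have hc0 : PySem.Set.contains (safeActionsFor sas s0) a = true :=
      (PySem.Set.contains_iff (safeActionsFor sas s0) a).mpr ha
    rw [Bool.eq_iff_iff, beq_iff_eq, List.all_eq_true]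
    constructor
    · intro h
      have h1 : (s0 :: rest).countP (fun s => PySem.Set.contains (safeActionsFor sas s) a)
          = (s0 :: rest).length :=
        List.countP_eq_length.mpr (by
          intro s hs
          rcases List.mem_cons.mp hs with rfl | hs
          · exact hc0
          · exact h s hs)
      rw [← hcnt a] at h1
      exact_mod_cast h1
    · intro h s hs
      have h1 : ((safeActionsFor sas s0 : List String)
          ++ rest.flatMap (fun s => safeActionsFor sas s)).count a = (s0 :: rest).length := by
        exact_mod_cast h
      rw [hcnt a] at h1
      exact List.countP_eq_length.mp h1 s (List.mem_cons_of_mem _ hs)
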